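-- pv_equiv track=rewrite | github.com/Yucheng7713/CodingPracticeByYuch | Medium/723_candyCrush.py | crashExist
-- ===== SOURCE A (Python) =====
-- def crashExist(board):
--     exist = False
--     # Horizental check - with window shifting of size 3
--     for i in range(len(board)):
--         for j in range(len(board[i]) - 2):
--             if board[i][j] != 0 and abs(board[i][j]) == abs(board[i][j + 1]) == abs(board[i][j + 2]):
--                 board[i][j] = board[i][j + 1] = board[i][j + 2] = -abs(board[i][j])
--                 exist = True
--     # Vertical check - with window shifting of size 3
--     for j in range(len(board[0])):
--         for i in range(len(board) - 2):
--             if board[i][j] != 0 and abs(board[i][j]) == abs(board[i + 1][j]) == abs(board[i + 2][j]):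
--                 board[i][j] = board[i + 1][j] = board[i + 2][j] = -abs(board[i][j])
--                 exist = True
--     return exist
-- ===== SOURCE B (Python) =====
-- # Run-based re-implementation: instead of sliding size-3 windows, detect maximal runs of
-- # equal nonzero absolute value per row and per column and mark whole runs at once.
-- # Mutates `board` in place exactly like the original (marked cells become -abs(value)).
-- def _mark_runs(line):
--     # Mark every maximal run of >= 3 equal-nonzero-abs cells with -abs(value), in place.
--     found = False
--     start = 0
--     for k in range(1, len(line) + 1):
--         if k == len(line) or abs(line[k]) != abs(line[start]):
--             if line[start] != 0 and k - start >= 3: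
--                 v = -abs(line[start])
--                 for t in range(start, k):
--                     line[t] = v
--                 found = True
--             start = k
--     return found
--
-- def crashExist(board):
--     exist = False
--     for row in board:
--         if _mark_runs(row):
--             exist = True
--     if len(board) >= 3:
--         for j in range(len(board[0])):
--             col = [row[j] for row in board]
--             if _mark_runs(col):
--                 for i in range(len(board)):
--                     board[i][j] = col[i]
--                 exist = True
--     return exist
-- ===== Notes on version B (the rewrite author's own statement) =====
-- stated objective: alternative
-- what changed: Replaces the two size-3 sliding-window scans (which re-test and re-write every overlapping window) by a run-length decomposition: each row and each extracted column is scanned once for maximal runs of equal nonzero absolute value, and a run of length >= 3 is marked in one shot.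
-- outside the precondition, e.g. on crashExist([[1], [2], []]): A returns False, B raises IndexError
import Mathlib
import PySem

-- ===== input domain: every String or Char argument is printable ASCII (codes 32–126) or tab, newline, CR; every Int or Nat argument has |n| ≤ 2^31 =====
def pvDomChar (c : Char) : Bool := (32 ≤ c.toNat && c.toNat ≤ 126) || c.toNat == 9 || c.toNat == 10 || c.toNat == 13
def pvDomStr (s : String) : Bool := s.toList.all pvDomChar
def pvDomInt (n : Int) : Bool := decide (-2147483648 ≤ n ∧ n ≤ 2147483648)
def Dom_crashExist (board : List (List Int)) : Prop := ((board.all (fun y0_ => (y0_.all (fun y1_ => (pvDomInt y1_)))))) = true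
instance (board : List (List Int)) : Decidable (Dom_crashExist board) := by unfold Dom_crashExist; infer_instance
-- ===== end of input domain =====

-- B replaces A's two size-3 sliding-window scans by a run-length decomposition of each row
-- and column (alternative decomposition, same cost). Both Pythons mutate `board` identically
-- (marked cells become -abs(value)); the equivalence proved here is about the return value.
-- All List.getD accesses in the ports use nonnegative range indices that are in range on
-- every access the Python performs on inputs admitted by Pre_; where the Python would raise
-- IndexError the input is excluded by Pre_.

-- ===== PORT A =====
-- board[i][j] = v
def setRC (b : List (List Int)) (i j : Nat) (v : Int) : List (List Int) :=
  b.set i ((b.getD i []).set j v)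

-- one horizontal window test/mark at (i, j)
def hstep (st : List (List Int) × Bool) (i j : Nat) : List (List Int) × Bool :=
  let row := st.1.getD i []
  if row.getD j 0 ≠ 0 ∧ (row.getD j 0).natAbs = (row.getD (j+1) 0).natAbs ∧
      (row.getD (j+1) 0).natAbs = (row.getD (j+2) 0).natAbs then
    let v : Int := -((row.getD j 0).natAbs : Int)
    (st.1.set i (((row.set j v).set (j+1) v).set (j+2) v), true)
  else st

-- one vertical window test/mark at (i, j)
def vstep (st : List (List Int) × Bool) (i j : Nat) : List (List Int) × Bool :=
  let x := (st.1.getD i []).getD j 0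
  let y := (st.1.getD (i+1) []).getD j 0
  let z := (st.1.getD (i+2) []).getD j 0
  if x ≠ 0 ∧ x.natAbs = y.natAbs ∧ y.natAbs = z.natAbs then
    let v : Int := -(x.natAbs : Int)
    (setRC (setRC (setRC st.1 i j v) (i+1) j v) (i+2) j v, true)
  else st

def crashExist (board : List (List Int)) : Bool :=
  let s1 := (List.range board.length).foldl (fun st i =>
      (List.range ((st.1.getD i []).length - 2)).foldl (fun st j => hstep st i j) st)
    (board, false)
  let s2 := (List.range ((s1.1.headD []).length)).foldl (fun st j =>
      (List.range (st.1.length - 2)).foldl (fun st i => vstep st i j) st) s1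
  s2.2

-- ===== PORT B =====
-- process boundary candidate k of the run starting at st.2.2 (Python _mark_runs loop body)
def markRunsStep (st : List Int × Bool × Nat) (k : Nat) : List Int × Bool × Nat :=
  let line := st.1
  let start := st.2.2
  if k = line.length ∨ (line.getD k 0).natAbs ≠ (line.getD start 0).natAbs then
    if line.getD start 0 ≠ 0 ∧ 3 ≤ k - start then
      let v : Int := -(((line.getD start 0).natAbs : Int))
      ((List.range' start (k - start)).foldl (fun l t => l.set t v) line, true, k)
    else (line, st.2.1, k)
  else st

-- Python _mark_runs: returns (mutated line, found)
def markRuns (line : List Int) : List Int × Bool :=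
  let st := (List.range' 1 line.length).foldl markRunsStep (line, false, 0)
  (st.1, st.2.1)

def crashExist_alt (board : List (List Int)) : Bool :=
  let s1 := board.foldl (fun (st : List (List Int) × Bool) row =>
      (st.1 ++ [(markRuns row).1], st.2 || (markRuns row).2)) ([], false)
  if 3 ≤ s1.1.length then
    let s2 := (List.range ((s1.1.headD []).length)).foldl (fun st j =>
        let col := st.1.map (fun row => row.getD j 0)
        let m := markRuns col
        if m.2 then
          ((List.range st.1.length).foldl
             (fun b i => b.set i ((b.getD i []).set j (m.1.getD i 0))) st.1, true)
        else st) s1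
    s2.2
  else s1.2

-- ===== PRECONDITION & SPEC =====
-- Pre_ excludes the empty board, on which A raises IndexError at len(board[0]), and ragged
-- boards with ≥ 3 rows in which some row is shorter than the first row, on which A's vertical
-- scan either raises IndexError or returns only by value-dependent short-circuiting (B raises
-- IndexError there).
def Pre_crashExist (board : List (List Int)) : Prop :=
  board ≠ [] ∧ (3 ≤ board.length → ∀ row ∈ board, (board.headD []).length ≤ row.length)
instance (board : List (List Int)) : Decidable (Pre_crashExist board) := by
  unfold Pre_crashExist; infer_instance

def pvWitness_crashExist : List (List Int) := [[1, -1, 1], [2, 0, 2], [3, 2, -3]]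

def Spec_crashExist (board : List (List Int)) (out : Bool) : Prop := out = crashExist_alt board
instance (board : List (List Int)) (out : Bool) : Decidable (Spec_crashExist board out) := by
  unfold Spec_crashExist; infer_instance

-- ===== CLAIM (what is proved, stated in full; the proofs are below) =====
def Claim_equal_crashExist : Prop := ∀ (board : List (List Int)),
  Dom_crashExist board → Pre_crashExist board → Spec_crashExist board (crashExist board)

-- ===== LEMMAS AND PROOFS =====
-- Both ports are shown equal to `tgt`: "some row or some column of the absolute-value board
-- contains a window of three equal nonzero entries" (marking only flips signs, so the
-- absolute-value board is invariant through both algorithms).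

def absRow (r : List Int) : List Nat := r.map Int.natAbs
def absB (b : List (List Int)) : List (List Nat) := b.map absRow
def winAt (l : List Nat) (j : Nat) : Bool :=
  decide (l.getD j 0 ≠ 0 ∧ l.getD j 0 = l.getD (j+1) 0 ∧ l.getD (j+1) 0 = l.getD (j+2) 0)
def win (l : List Nat) : Bool := (List.range (l.length - 2)).any (winAt l)
def colOf (A : List (List Nat)) (j : Nat) : List Nat := A.map (fun r => r.getD j 0)
def tgt (b : List (List Int)) : Bool :=
  (absB b).any win ||
    (List.range ((b.headD []).length)).any (fun j => win (colOf (absB b) j))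

lemma getD_absRow (r : List Int) (j : Nat) : (absRow r).getD j 0 = (r.getD j 0).natAbs := by
  simp only [absRow, List.getD_eq_getElem?_getD, List.getElem?_map]
  cases r[j]? <;> simp

lemma length_absRow (r : List Int) : (absRow r).length = r.length := List.length_map ..

lemma getD_absB (b : List (List Int)) (i : Nat) : (absB b).getD i [] = absRow (b.getD i []) := by
  simp only [absB, List.getD_eq_getElem?_getD, List.getElem?_map]
  cases b[i]? <;> simp [absRow]

lemma getD_colOf (A : List (List Nat)) (j i : Nat) :
    (colOf A j).getD i 0 = (A.getD i []).getD j 0 := by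
  simp only [colOf, List.getD_eq_getElem?_getD, List.getElem?_map]
  cases A[i]? <;> simp

lemma set_getD_self {α : Type} (l : List α) (n : Nat) (d : α) : l.set n (l.getD n d) = l := by
  by_cases h : n < l.length
  · have hd : l.getD n d = l[n] := by
      rw [List.getD_eq_getElem?_getD, List.getElem?_eq_getElem h]; rfl
    rw [hd]; exact List.set_getElem_self ..
  · exact List.set_eq_of_length_le (Nat.le_of_not_lt h)

lemma absRow_set_same (r : List Int) (j : Nat) (v : Int)
    (h : v.natAbs = (r.getD j 0).natAbs) : absRow (r.set j v) = absRow r := by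
  show (r.set j v).map Int.natAbs = absRow r
  rw [List.map_set, h, ← getD_absRow]
  exact set_getD_self ..

lemma absRow_set_trans (r r' : List Int) (j : Nat) (v : Int) (h : absRow r' = absRow r)
    (hv : v.natAbs = (r.getD j 0).natAbs) : absRow (r'.set j v) = absRow r := by
  rw [absRow_set_same r' j v (by rw [← getD_absRow, h, getD_absRow, ← hv]), h]

lemma absB_setRC_same (b : List (List Int)) (i j : Nat) (v : Int)
    (h : v.natAbs = ((b.getD i []).getD j 0).natAbs) :
    absB (b.set i ((b.getD i []).set j v)) = absB b := by
  show (b.set i _).map absRow = absB b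
  rw [List.map_set, absRow_set_same _ _ _ h, ← getD_absB]
  exact set_getD_self ..

lemma cellAbs_eq (b : List (List Int)) (i j : Nat) :
    ((b.getD i []).getD j 0).natAbs = ((absB b).getD i []).getD j 0 := by
  rw [getD_absB, getD_absRow]

lemma absB_setRC_trans (b b' : List (List Int)) (i j : Nat) (v : Int)
    (h : absB b' = absB b) (hv : v.natAbs = ((b.getD i []).getD j 0).natAbs) :
    absB (b'.set i ((b'.getD i []).set j v)) = absB b := by
  rw [absB_setRC_same b' i j v (by rw [cellAbs_eq, h, ← cellAbs_eq, ← hv]), h]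

lemma range_any_getD {α : Type} (A : List α) (d : α) (f : α → Bool) :
    (List.range A.length).any (fun i => f (A.getD i d)) = A.any f := by
  induction A with
  | nil => rfl
  | cons a A ih =>
      rw [List.length_cons, List.range_succ_eq_map]
      simp only [List.any_cons, List.any_map, Function.comp_def]
      show (f ((a :: A).getD 0 d) || (List.range A.length).any fun i => f ((a :: A).getD (i+1) d))
          = (f a || A.any f)
      rw [← ih]; rfl

-- ---- A, horizontal pass ----
lemma hstep_fst (st : List (List Int) × Bool) (i j : Nat) :
    absB (hstep st i j).1 = absB st.1 := by
  simp only [hstep]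
  split
  case isFalse => rfl
  case isTrue h =>
    obtain ⟨hx, h12, h23⟩ := h
    set r := st.1.getD i [] with hr
    set v : Int := -(((r.getD j 0).natAbs : Int)) with hv
    have hv1 : v.natAbs = (r.getD j 0).natAbs := by simp [hv, Int.natAbs_abs]
    have hv2 : v.natAbs = (r.getD (j+1) 0).natAbs := by rw [hv1, h12]
    have hv3 : v.natAbs = (r.getD (j+2) 0).natAbs := by rw [hv2, h23]
    have hrow : absRow (((r.set j v).set (j+1) v).set (j+2) v) = absRow r :=
      absRow_set_trans _ _ _ _
        (absRow_set_trans _ _ _ _ (absRow_set_trans _ _ _ _ rfl hv1) hv2) hv3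
    show absB (st.1.set i _) = absB st.1
    calc absB (st.1.set i (((r.set j v).set (j+1) v).set (j+2) v))
        = (absB st.1).set i (absRow (((r.set j v).set (j+1) v).set (j+2) v)) := by
          simp only [absB, List.map_set]
      _ = (absB st.1).set i ((absB st.1).getD i []) := by rw [hrow, getD_absB]
      _ = absB st.1 := set_getD_self ..

lemma hstep_snd (st : List (List Int) × Bool) (i j : Nat) :
    (hstep st i j).2 = (st.2 || winAt (absRow (st.1.getD i [])) j) := by
  simp only [hstep]
  split
  case isTrue h =>
    obtain ⟨hx, h12, h23⟩ := h
    have : winAt (absRow (st.1.getD i [])) j = true := by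
      simp only [winAt, getD_absRow, decide_eq_true_eq]
      exact ⟨Int.natAbs_ne_zero.mpr hx, h12, h23⟩
    rw [this, Bool.or_true]
  case isFalse h =>
    have : winAt (absRow (st.1.getD i [])) j = false := by
      simp only [winAt, getD_absRow, decide_eq_false_iff_not]
      intro ⟨a, b, c⟩
      exact h ⟨Int.natAbs_ne_zero.mp a, b, c⟩
    rw [this, Bool.or_false]

lemma hfold_inner (i : Nat) (js : List Nat) (st : List (List Int) × Bool) :
    absB (js.foldl (fun st j => hstep st i j) st).1 = absB st.1 ∧
    (js.foldl (fun st j => hstep st i j) st).2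
      = (st.2 || js.any (winAt (absRow (st.1.getD i [])))) := by
  induction js generalizing st with
  | nil => exact ⟨rfl, by simp⟩
  | cons j js ih =>
      simp only [List.foldl_cons, List.any_cons]
      obtain ⟨ha, hf⟩ := ih (hstep st i j)
      have hrow : absRow ((hstep st i j).1.getD i []) = absRow (st.1.getD i []) := by
        rw [← getD_absB, hstep_fst, getD_absB]
      refine ⟨by rw [ha, hstep_fst], ?_⟩
      rw [hf, hrow, hstep_snd, Bool.or_assoc]

lemma hfold_outer (is : List Nat) (st : List (List Int) × Bool) :
    absB ((is.foldl (fun st i =>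
        (List.range ((st.1.getD i []).length - 2)).foldl (fun st j => hstep st i j) st) st)).1
      = absB st.1 ∧
    (is.foldl (fun st i =>
        (List.range ((st.1.getD i []).length - 2)).foldl (fun st j => hstep st i j) st) st).2
      = (st.2 || is.any (fun i => win ((absB st.1).getD i []))) := by
  induction is generalizing st with
  | nil => exact ⟨rfl, by simp⟩
  | cons i is ih =>
      simp only [List.foldl_cons, List.any_cons]
      obtain ⟨hai, hfi⟩ := hfold_inner i (List.range ((st.1.getD i []).length - 2)) st
      obtain ⟨ha, hf⟩ := ih
        ((List.range ((st.1.getD i []).length - 2)).foldl (fun st j => hstep st i j) st)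
      have hwin : (List.range ((st.1.getD i []).length - 2)).any
          (winAt (absRow (st.1.getD i []))) = win ((absB st.1).getD i []) := by
        rw [getD_absB, win, length_absRow]
      refine ⟨by rw [ha, hai], ?_⟩
      rw [hf, hai, hfi, hwin, Bool.or_assoc]

-- ---- A, vertical pass ----
lemma vstep_fst (st : List (List Int) × Bool) (i j : Nat) :
    absB (vstep st i j).1 = absB st.1 := by
  simp only [vstep, setRC]
  split
  case isFalse => rfl
  case isTrue h =>
    obtain ⟨hx, hxy, hyz⟩ := h
    set v : Int := -((((st.1.getD i []).getD j 0).natAbs : Int)) with hv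
    have hv1 : v.natAbs = ((st.1.getD i []).getD j 0).natAbs := by simp [hv, Int.natAbs_abs]
    have hv2 : v.natAbs = ((st.1.getD (i+1) []).getD j 0).natAbs := by rw [hv1, hxy]
    have hv3 : v.natAbs = ((st.1.getD (i+2) []).getD j 0).natAbs := by rw [hv2, hyz]
    exact absB_setRC_trans _ _ _ _ _
      (absB_setRC_trans _ _ _ _ _ (absB_setRC_trans _ _ _ _ _ rfl hv1) hv2) hv3

lemma vstep_snd (st : List (List Int) × Bool) (i j : Nat) :
    (vstep st i j).2 = (st.2 || winAt (colOf (absB st.1) j) i) := by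
  have g : ∀ k, (colOf (absB st.1) j).getD k 0 = ((st.1.getD k []).getD j 0).natAbs := by
    intro k; rw [getD_colOf, ← cellAbs_eq]
  simp only [vstep]
  split
  case isTrue h =>
    obtain ⟨hx, hxy, hyz⟩ := h
    have : winAt (colOf (absB st.1) j) i = true := by
      simp only [winAt, g, decide_eq_true_eq]
      exact ⟨Int.natAbs_ne_zero.mpr hx, hxy, hyz⟩
    rw [this, Bool.or_true]
  case isFalse h =>
    have : winAt (colOf (absB st.1) j) i = false := by
      simp only [winAt, g, decide_eq_false_iff_not]
      intro ⟨a, b, c⟩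
      exact h ⟨Int.natAbs_ne_zero.mp a, b, c⟩
    rw [this, Bool.or_false]

lemma vfold_inner (j : Nat) (is : List Nat) (st : List (List Int) × Bool) :
    absB (is.foldl (fun st i => vstep st i j) st).1 = absB st.1 ∧
    (is.foldl (fun st i => vstep st i j) st).2
      = (st.2 || is.any (winAt (colOf (absB st.1) j))) := by
  induction is generalizing st with
  | nil => exact ⟨rfl, by simp⟩
  | cons i is ih =>
      simp only [List.foldl_cons, List.any_cons]
      obtain ⟨ha, hf⟩ := ih (vstep st i j)
      refine ⟨by rw [ha, vstep_fst], ?_⟩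
      rw [hf, vstep_fst, vstep_snd, Bool.or_assoc]

lemma vfold_outer (js : List Nat) (st : List (List Int) × Bool) :
    absB ((js.foldl (fun st j =>
        (List.range (st.1.length - 2)).foldl (fun st i => vstep st i j) st) st)).1
      = absB st.1 ∧
    (js.foldl (fun st j =>
        (List.range (st.1.length - 2)).foldl (fun st i => vstep st i j) st) st).2
      = (st.2 || js.any (fun j => win (colOf (absB st.1) j))) := by
  induction js generalizing st with
  | nil => exact ⟨rfl, by simp⟩
  | cons j js ih =>
      simp only [List.foldl_cons, List.any_cons]
      obtain ⟨hai, hfi⟩ := vfold_inner j (List.range (st.1.length - 2)) st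
      obtain ⟨ha, hf⟩ := ih ((List.range (st.1.length - 2)).foldl (fun st i => vstep st i j) st)
      have hlen : st.1.length = (colOf (absB st.1) j).length := by
        simp [colOf, absB]
      have hwin : (List.range (st.1.length - 2)).any (winAt (colOf (absB st.1) j))
          = win (colOf (absB st.1) j) := by
        rw [win, ← hlen]
      refine ⟨by rw [ha, hai], ?_⟩
      rw [hf, hai, hfi, hwin, Bool.or_assoc]

lemma length_absB (b : List (List Int)) : (absB b).length = b.length := List.length_map ..

lemma headD_absB (b : List (List Int)) : (absB b).headD [] = absRow (b.headD []) := by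
  cases b <;> rfl

lemma headD_len_congr (x y : List (List Int)) (h : absB x = absB y) :
    (x.headD []).length = (y.headD []).length := by
  have := congrArg (fun A => (A.headD ([] : List Nat)).length) h
  simpa only [headD_absB, length_absRow] using this

lemma crashExist_eq_tgt (b : List (List Int)) : crashExist b = tgt b := by
  simp only [crashExist]
  set s1 := (List.range b.length).foldl (fun st i =>
      (List.range ((st.1.getD i []).length - 2)).foldl (fun st j => hstep st i j) st)
    (b, false) with hs1
  set s2 := (List.range ((s1.1.headD []).length)).foldl (fun st j =>
      (List.range (st.1.length - 2)).foldl (fun st i => vstep st i j) st) s1 with hs2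
  obtain ⟨ha1, hf1⟩ := hfold_outer (List.range b.length) (b, false)
  rw [← hs1] at ha1 hf1
  obtain ⟨ha2, hf2⟩ := vfold_outer (List.range ((s1.1.headD []).length)) s1
  rw [← hs2] at ha2 hf2
  have hh : (s1.1.headD []).length = (b.headD []).length := headD_len_congr _ _ (by rw [ha1])
  have hH : s1.2 = (absB b).any win := by
    rw [hf1, Bool.false_or, ← length_absB, range_any_getD]
  show s2.2 = tgt b
  rw [hf2, ha1, hh, hH, tgt]

-- ---- B, run marking ----
def RInv (r : List Int) (m : Nat) (st : List Int × Bool × Nat) : Prop :=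
  absRow st.1 = absRow r ∧
  st.2.2 ≤ m ∧ m ≤ r.length ∧
  (∀ t, st.2.2 ≤ t → t ≤ m → t < r.length →
      (absRow r).getD t 0 = (absRow r).getD st.2.2 0) ∧
  (st.2.1 = true ↔ ∃ j, j + 2 < st.2.2 ∧ winAt (absRow r) j = true) ∧
  (st.2.2 = 0 ∨ (absRow r).getD (st.2.2 - 1) 0 ≠ (absRow r).getD st.2.2 0 ∨ st.2.2 = r.length) ∧
  (m = r.length → st.2.2 = r.length)

lemma markRunFold_absRow (v : Int) : ∀ (cnt s : Nat) (l : List Int),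
    (∀ t, s ≤ t → t < s + cnt → v.natAbs = (l.getD t 0).natAbs) →
    absRow ((List.range' s cnt).foldl (fun l t => l.set t v) l) = absRow l
  | 0, s, l, _ => rfl
  | cnt+1, s, l, h => by
      rw [List.range'_succ, List.foldl_cons]
      have h0 : v.natAbs = (l.getD s 0).natAbs := h s le_rfl (by omega)
      have hset : absRow (l.set s v) = absRow l := absRow_set_same _ _ _ h0
      have hrec := markRunFold_absRow v cnt (s+1) (l.set s v) (fun t ht1 ht2 => by
        rw [← getD_absRow, hset, getD_absRow]; exact h t (by omega) (by omega))
      rw [hrec, hset]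

lemma markRunsStep_inv (r : List Int) (m : Nat) (st : List Int × Bool × Nat)
    (h : RInv r m st) (hm : m < r.length) : RInv r (m+1) (markRunsStep st (m+1)) := by
  obtain ⟨hL, hs, hmn, hrun, hfound, hbd, hend⟩ := h
  have hlen : st.1.length = r.length := by
    have := congrArg List.length hL
    simpa [length_absRow] using this
  have hget : ∀ t, (st.1.getD t 0).natAbs = (absRow r).getD t 0 := fun t => by
    rw [← getD_absRow, hL]
  simp only [markRunsStep]
  split
  case isFalse hc =>
    push Not at hc
    obtain ⟨hc1, hc2⟩ := hc
    refine ⟨hL, by omega, by omega, ?_, hfound, hbd, ?_⟩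
    · intro t ht1 ht2 ht3
      rcases Nat.lt_or_ge t (m+1) with hlt | hge
      · exact hrun t ht1 (by omega) ht3
      · have ht : t = m + 1 := by omega
        subst ht
        rw [← hget, ← hget, hc2]
    · intro he; exact absurd (hlen.symm ▸ he.symm) (fun he' => hc1 he'.symm)
  case isTrue hc =>
    have hbd' : ((m+1 : Nat) = 0 ∨
        (absRow r).getD ((m+1) - 1) 0 ≠ (absRow r).getD (m+1) 0 ∨ (m+1) = r.length) := by
      rcases Nat.lt_or_ge (m+1) r.length with hlt | hge
      · rcases hc with hc1 | hc2
        · exact absurd (hlen ▸ hc1) (by omega)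
        · refine Or.inr (Or.inl ?_)
          have hm0 : (absRow r).getD m 0 = (absRow r).getD st.2.2 0 :=
            hrun m hs le_rfl hm
          have : (absRow r).getD (m+1) 0 ≠ (absRow r).getD st.2.2 0 := by
            rw [← hget, ← hget]; exact hc2
          simp only [Nat.add_sub_cancel]
          rw [hm0]; exact fun hh => this (hh.symm)
      · exact Or.inr (Or.inr (by omega))
    split
    case isTrue hmk =>
      obtain ⟨hnz, h3⟩ := hmk
      dsimp only [RInv]
      constructor
      · -- abs preserved by marking the run
        have := markRunFold_absRow (-(((st.1.getD st.2.2 0).natAbs : Int)))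
          ((m+1) - st.2.2) st.2.2 st.1 (fun t ht1 ht2 => by
            have hta : (absRow r).getD t 0 = (absRow r).getD st.2.2 0 :=
              hrun t ht1 (by omega) (by omega)
            rw [← hget, ← hget] at hta
            simpa [Int.natAbs_abs, List.getD_eq_getElem?_getD] using hta.symm)
        rw [this, hL]
      refine ⟨le_rfl, by omega, ?_, ?_, hbd', fun he => he⟩
      · intro t ht1 ht2 _; have : t = m + 1 := by omega
        subst this; rfl
      · simp only [true_iff]
        obtain ⟨q, hq⟩ : ∃ q, m + 1 = q + 3 := ⟨m - 2, by omega⟩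
        refine ⟨q, by omega, ?_⟩
        have hv : ∀ t, st.2.2 ≤ t → t ≤ m → (absRow r).getD t 0 = (absRow r).getD st.2.2 0 :=
          fun t h1 h2 => hrun t h1 h2 (by omega)
        have e0 := hv q (by omega) (by omega)
        have e1 := hv (q+1) (by omega) (by omega)
        have e2 := hv (q+2) (by omega) (by omega)
        simp only [winAt, decide_eq_true_eq]
        refine ⟨?_, by rw [e0, e1], by rw [e1, e2]⟩
        rw [e0, ← hget]
        exact Int.natAbs_ne_zero.mpr hnz
    case isFalse hmk =>
      dsimp only [RInv]
      refine ⟨hL, le_rfl, by omega, ?_, ?_, hbd', fun he => he⟩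
      · intro t ht1 ht2 _; have : t = m + 1 := by omega
        subst this; rfl
      · rw [hfound]
        constructor
        · rintro ⟨j, hj, hw⟩; exact ⟨j, by omega, hw⟩
        · rintro ⟨j, hj, hw⟩
          refine ⟨j, ?_, hw⟩
          by_contra hge
          push Not at hge
          simp only [winAt, decide_eq_true_eq] at hw
          obtain ⟨hnz, he1, he2⟩ := hw
          have hjs : st.2.2 ≤ j := by
            by_contra hlt
            push Not at hlt
            have hne : (absRow r).getD (st.2.2 - 1) 0 ≠ (absRow r).getD st.2.2 0 := by
              rcases hbd with h0 | hne | hlen'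
              · omega
              · exact hne
              · omega
            rcases Nat.lt_or_ge j (st.2.2 - 1) with hc' | hc'
            · -- start = j + 2 : positions j+1 = start-1, j+2 = start
              have e1' : st.2.2 = j + 2 := by omega
              apply hne
              rw [e1', show j + 2 - 1 = j + 1 from by omega]
              exact he2
            · -- start = j + 1 : positions j = start-1, j+1 = start
              have e1' : st.2.2 = j + 1 := by omega
              apply hne
              rw [e1', show j + 1 - 1 = j from by omega]
              exact he1
          have hja : (absRow r).getD j 0 = (absRow r).getD st.2.2 0 :=
            hrun j hjs (by omega) (by omega)
          rcases (Decidable.not_and_iff_or_not ..).mp hmk with hz | h3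
          · push Not at hz
            apply hnz
            rw [hja, ← hget, hz]
            rfl
          · omega

lemma markRunsFold_inv (r : List Int) : ∀ (cnt m : Nat) (st : List Int × Bool × Nat),
    RInv r m st → m + cnt = r.length →
    RInv r r.length ((List.range' (m+1) cnt).foldl markRunsStep st)
  | 0, m, st, h, he => by
      have : m = r.length := by omega
      subst this
      exact h
  | cnt+1, m, st, h, he => by
      rw [List.range'_succ, List.foldl_cons]
      exact markRunsFold_inv r cnt (m+1) _ (markRunsStep_inv r m st h (by omega)) (by omega)

lemma markRuns_flag (l : List Int) :
    absRow (markRuns l).1 = absRow l ∧ (markRuns l).2 = win (absRow l) := by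
  have h0 : RInv l 0 (l, false, 0) := by
    refine ⟨rfl, le_rfl, Nat.zero_le _, ?_, by simp, Or.inl rfl, fun he => he⟩
    intro t h1 h2 _
    have : t = 0 := by omega
    subst this; rfl
  have H := markRunsFold_inv l l.length 0 (l, false, 0) h0 (by omega)
  obtain ⟨hL, hs, hmn, hrun, hfound, hbd, hend⟩ := H
  have hstart := hend rfl
  rw [hstart] at hfound
  have hwin : win (absRow l) = true ↔ ∃ j, j + 2 < l.length ∧ winAt (absRow l) j = true := by
    simp only [win, List.any_eq_true, List.mem_range, length_absRow]
    constructor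
    · rintro ⟨j, hj, hw⟩; exact ⟨j, by omega, hw⟩
    · rintro ⟨j, hj, hw⟩; exact ⟨j, by omega, hw⟩
  refine ⟨hL, ?_⟩
  have : ((List.range' 1 l.length).foldl markRunsStep (l, false, 0)).2.1 = true
      ↔ win (absRow l) = true := by rw [hfound, hwin]
  exact Bool.eq_iff_iff.mpr (by simpa [markRuns] using this)

-- ---- B, top level ----
lemma bfold_rows (rows : List (List Int)) (acc : List (List Int) × Bool) :
    absB (rows.foldl (fun st row => (st.1 ++ [(markRuns row).1], st.2 || (markRuns row).2)) acc).1
      = absB acc.1 ++ absB rows ∧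
    (rows.foldl (fun st row => (st.1 ++ [(markRuns row).1], st.2 || (markRuns row).2)) acc).2
      = (acc.2 || rows.any (fun row => win (absRow row))) := by
  induction rows generalizing acc with
  | nil => exact ⟨by simp [absB], by simp⟩
  | cons row rows ih =>
      simp only [List.foldl_cons, List.any_cons]
      obtain ⟨ha, hf⟩ := ih (acc.1 ++ [(markRuns row).1], acc.2 || (markRuns row).2)
      constructor
      · rw [ha]
        simp [absB, (markRuns_flag row).1, List.append_assoc]
      · rw [hf, (markRuns_flag row).2, Bool.or_assoc]

lemma absRow_colmap (b : List (List Int)) (j : Nat) :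
    absRow (b.map (fun row => row.getD j 0)) = colOf (absB b) j := by
  simp only [absRow, colOf, absB, List.map_map]
  congr 1
  funext row
  exact (getD_absRow row j).symm

lemma wb_absB (w : Nat → Int) (j : Nat) : ∀ (is : List Nat) (b0 b : List (List Int)),
    absB b = absB b0 → (∀ i, (w i).natAbs = ((b0.getD i []).getD j 0).natAbs) →
    absB (is.foldl (fun b i => b.set i ((b.getD i []).set j (w i))) b) = absB b0
  | [], b0, b, h, _ => h
  | i :: is, b0, b, h, hw => by
      rw [List.foldl_cons]
      exact wb_absB w j is b0 _ (absB_setRC_trans b0 b i j (w i) h (hw i)) hw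

lemma bvstep (st : List (List Int) × Bool) (j : Nat) :
    absB ((fun (st : List (List Int) × Bool) j =>
        let col := st.1.map (fun row => row.getD j 0)
        let m := markRuns col
        if m.2 then
          ((List.range st.1.length).foldl
             (fun b i => b.set i ((b.getD i []).set j (m.1.getD i 0))) st.1, true)
        else st) st j).1 = absB st.1 ∧
    ((fun (st : List (List Int) × Bool) j =>
        let col := st.1.map (fun row => row.getD j 0)
        let m := markRuns col
        if m.2 then
          ((List.range st.1.length).foldl
             (fun b i => b.set i ((b.getD i []).set j (m.1.getD i 0))) st.1, true)
        else st) st j).2 = (st.2 || win (colOf (absB st.1) j)) := by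
  have hcol := absRow_colmap st.1 j
  have hm1 := (markRuns_flag (st.1.map (fun row => row.getD j 0))).1
  have hm2 := (markRuns_flag (st.1.map (fun row => row.getD j 0))).2
  have hw : ∀ i, ((markRuns (st.1.map (fun row => row.getD j 0))).1.getD i 0).natAbs
      = ((st.1.getD i []).getD j 0).natAbs := by
    intro i
    rw [← getD_absRow, hm1, hcol, getD_colOf, ← cellAbs_eq]
  simp only []
  split
  case isTrue hmt =>
    constructor
    · exact wb_absB (fun i => (markRuns (st.1.map (fun row => row.getD j 0))).1.getD i 0) j
        (List.range st.1.length) st.1 st.1 rfl hw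
    · rw [← hcol, ← hm2, hmt, Bool.or_true]
  case isFalse hmf =>
    refine ⟨rfl, ?_⟩
    rw [← hcol, ← hm2, Bool.eq_false_iff.mpr hmf, Bool.or_false]

lemma bvfold (js : List Nat) (st : List (List Int) × Bool) :
    absB ((js.foldl (fun (st : List (List Int) × Bool) j =>
        let col := st.1.map (fun row => row.getD j 0)
        let m := markRuns col
        if m.2 then
          ((List.range st.1.length).foldl
             (fun b i => b.set i ((b.getD i []).set j (m.1.getD i 0))) st.1, true)
        else st) st)).1 = absB st.1 ∧
    (js.foldl (fun (st : List (List Int) × Bool) j =>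
        let col := st.1.map (fun row => row.getD j 0)
        let m := markRuns col
        if m.2 then
          ((List.range st.1.length).foldl
             (fun b i => b.set i ((b.getD i []).set j (m.1.getD i 0))) st.1, true)
        else st) st).2 = (st.2 || js.any (fun j => win (colOf (absB st.1) j))) := by
  induction js generalizing st with
  | nil => exact ⟨rfl, by simp⟩
  | cons j js ih =>
      simp only [List.foldl_cons, List.any_cons]
      obtain ⟨hsa, hsf⟩ := bvstep st j
      obtain ⟨ha, hf⟩ := ih _
      refine ⟨by rw [ha, hsa], ?_⟩
      rw [hf, hsa, hsf, Bool.or_assoc]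

lemma crashExist_alt_eq_tgt (b : List (List Int)) : crashExist_alt b = tgt b := by
  simp only [crashExist_alt]
  set s1 := b.foldl (fun (st : List (List Int) × Bool) row =>
      (st.1 ++ [(markRuns row).1], st.2 || (markRuns row).2)) ([], false) with hs1
  obtain ⟨ha1, hf1⟩ := bfold_rows b ([], false)
  rw [← hs1] at ha1 hf1
  have ha1' : absB s1.1 = absB b := by simpa [absB] using ha1
  have hlen1 : s1.1.length = b.length := by
    have := congrArg List.length ha1'
    simpa [length_absB] using this
  have hH : s1.2 = (absB b).any win := by
    rw [hf1, Bool.false_or, absB, List.any_map]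
    rfl
  split
  case isTrue h3 =>
    obtain ⟨ha2, hf2⟩ := bvfold (List.range ((s1.1.headD []).length)) s1
    have hh : (s1.1.headD []).length = (b.headD []).length := headD_len_congr _ _ ha1'
    rw [hf2, ha1', hh, hH, tgt]
  case isFalse h3 =>
    have hb3 : b.length < 3 := by omega
    have hnone : ∀ j, win (colOf (absB b) j) = false := by
      intro j
      rw [win]
      have hl : (colOf (absB b) j).length = b.length := by
        simp [colOf, length_absB]
      rw [hl, show b.length - 2 = 0 from by omega]
      rfl
    rw [hH, tgt]
    simp [hnone]

-- ===== VERDICT (by name: the statement is the Claim_ definition above) =====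
theorem crashExist_spec : Claim_equal_crashExist := by
  intro board _ _
  show crashExist board = crashExist_alt board
  rw [crashExist_eq_tgt, crashExist_alt_eq_tgt]
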